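-- pv_equiv track=rewrite | github.com/kizuna-intelligence/kizuna-voice-studio | src/voice_factory/service.py | _short_label
-- ===== SOURCE A (Python) =====
-- def _short_label(text: str, default: str = "custom-voice", max_len: int = 32) -> str:
--     keep = []
--     prev_dash = False
--     for ch in text.lower():
--         if ("a" <= ch <= "z") or ("0" <= ch <= "9"):
--             keep.append(ch)
--             prev_dash = False
--         elif not prev_dash:
--             keep.append("-")
--             prev_dash = True
--     label = "".join(keep).strip("-")
--     return (label[:max_len].rstrip("-") or default)
-- ===== SOURCE B (Python) =====
-- def _short_label(text: str, default: str = "custom-voice", max_len: int = 32) -> str: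
--     # Map every non-alphanumeric character of the lowercased text to a space,
--     # let str.split() collapse/trim the separator runs, and join the words with '-'.
--     words = "".join(ch if ch.isalnum() else " " for ch in text.lower()).split()
--     return "-".join(words)[:max_len].rstrip("-") or default
-- ===== Notes on version B (the rewrite author's own statement) =====
-- stated objective: idiomatic
-- what changed: Replaces the per-character prev_dash state machine and its trailing strip of separator runs with mapping every non-alphanumeric character of the lowercased text to a space, letting str.split collapse and trim the separator runs, and joining the words with hyphens.
import Mathlib
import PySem

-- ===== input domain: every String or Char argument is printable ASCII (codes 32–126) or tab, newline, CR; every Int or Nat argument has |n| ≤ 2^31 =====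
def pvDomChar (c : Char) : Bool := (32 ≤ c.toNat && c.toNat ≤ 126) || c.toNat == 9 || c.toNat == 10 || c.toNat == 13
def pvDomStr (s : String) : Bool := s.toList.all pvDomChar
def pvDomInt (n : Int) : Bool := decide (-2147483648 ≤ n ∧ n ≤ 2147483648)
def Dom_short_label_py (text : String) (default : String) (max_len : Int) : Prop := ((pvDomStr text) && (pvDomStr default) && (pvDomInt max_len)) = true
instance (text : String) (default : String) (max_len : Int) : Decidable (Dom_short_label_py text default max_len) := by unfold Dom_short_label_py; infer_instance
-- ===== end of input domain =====

-- B replaces A's per-character prev_dash state machine (and its strip('-')) with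
-- map-non-alnum-to-space + split() + '-'.join — more idiomatic, same cost.

-- shared helper: Python's  s.rstrip('-')  (PySem has no rstrip-with-chars; exact:
-- drops exactly the maximal trailing run of '-').
def pvRstripDash (cs : List Char) : List Char := (cs.reverse.dropWhile (· == '-')).reverse

-- ===== PORT A =====
def short_label_py (text : String) (default : String) (max_len : Int) : String :=
  -- for ch in text.lower(): the state machine over (keep, prev_dash)
  let step : (List Char × Bool) → Char → (List Char × Bool) := fun st ch =>
    if ('a' ≤ ch ∧ ch ≤ 'z') ∨ ('0' ≤ ch ∧ ch ≤ '9') then (st.1 ++ [ch], false)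
    else if st.2 = false then (st.1 ++ ['-'], true) else st
  let keep := ((PySem.Chars.lower text.toList).foldl step ([], false)).1
  let label := PySem.Chars.stripChars keep ['-']          -- "".join(keep).strip("-")
  let res := pvRstripDash (PySem.Chars.slice label none (some max_len))  -- label[:max_len].rstrip("-")
  if res.isEmpty then default else String.ofList res      -- … or default

-- ===== PORT B =====
def short_label_py_alt (text : String) (default : String) (max_len : Int) : String :=
  -- "".join(ch if ch.isalnum() else " " for ch in text.lower())
  let spaced := (PySem.Chars.lower text.toList).map
      (fun ch => if PySem.Chars.isalnum ch then ch else ' ')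
  let words := PySem.Chars.split₀ spaced                  -- .split()
  let label := PySem.Chars.join ['-'] words               -- "-".join(words)
  let res := pvRstripDash (PySem.Chars.slice label none (some max_len))  -- [:max_len].rstrip("-")
  if res.isEmpty then default else String.ofList res      -- … or default

-- ===== PRECONDITION & SPEC =====
def Spec_short_label_py (text : String) (default : String) (max_len : Int) (out : String) : Prop := out = short_label_py_alt text default max_len
instance (text : String) (default : String) (max_len : Int) (out : String) : Decidable (Spec_short_label_py text default max_len out) := by unfold Spec_short_label_py; infer_instance

-- ===== CLAIM (what is proved, stated in full; the proofs are below) =====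
def Claim_equal_short_label_py : Prop := ∀ (text : String) (default : String) (max_len : Int), Dom_short_label_py text default max_len → Spec_short_label_py text default max_len (short_label_py text default max_len)

-- ===== LEMMAS AND PROOFS =====

-- A's alphanumeric test, as a Bool
def pvAln (c : Char) : Bool := decide (('a' ≤ c ∧ c ≤ 'z') ∨ ('0' ≤ c ∧ c ≤ '9'))

-- A's state machine, as structural recursion on the remaining input
def pvKf (p : Bool) : List Char → List Char
  | [] => []
  | c :: cs =>
    if PySem.Chars.isalnum c then c :: pvKf false cs
    else if p then pvKf true cs else '-' :: pvKf true cs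

-- B's split₀-with-accumulator, specialised to the mapped input (cur holds the
-- reversed current word)
def pvAux (cur : List Char) : List Char → List (List Char)
  | [] => if cur.isEmpty then [] else [cur.reverse]
  | c :: cs =>
    if PySem.Chars.isalnum c then pvAux (c :: cur) cs
    else (if cur.isEmpty then [] else [cur.reverse]) ++ pvAux [] cs

-- ---- char-level facts ----

theorem pvChar128 : ∀ n : Fin 128,
    pvAln (PySem.Chars.lowerChar (Char.ofNat n)) = PySem.Chars.isalnum (PySem.Chars.lowerChar (Char.ofNat n)) := by
  decide

theorem pvChar128b : ∀ n : Fin 128, PySem.Chars.isalnum (Char.ofNat n) = true →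
    PySem.Chars.isspace (Char.ofNat n) = false ∧ Char.ofNat n ≠ '-' := by
  decide

theorem pvAlnumLt (c : Char) (h : PySem.Chars.isalnum c = true) : c.toNat < 128 := by
  simp only [PySem.Chars.isalnum, PySem.Chars.isalpha, PySem.Chars.isupper, PySem.Chars.islower,
    PySem.Chars.isdigit, Char.le_def, UInt32.le_iff_toNat_le, Bool.or_eq_true, Bool.and_eq_true,
    decide_eq_true_eq] at h
  have e1 : ('a').val.toNat = 97 := by decide
  have e2 : ('z').val.toNat = 122 := by decide
  have e3 : ('A').val.toNat = 65 := by decide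
  have e4 : ('Z').val.toNat = 90 := by decide
  have e5 : ('0').val.toNat = 48 := by decide
  have e6 : ('9').val.toNat = 57 := by decide
  show c.val.toNat < 128
  omega

theorem pvAln_eq_isalnum (c : Char) (h : pvDomChar c = true) :
    pvAln (PySem.Chars.lowerChar c) = PySem.Chars.isalnum (PySem.Chars.lowerChar c) := by
  have hlt : c.toNat < 128 := by
    simp only [pvDomChar, Bool.or_eq_true, Bool.and_eq_true, decide_eq_true_eq, beq_iff_eq] at h
    omega
  have := pvChar128 ⟨c.toNat, hlt⟩
  simpa [Char.ofNat_toNat] using this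

theorem pv_alnum_not_space (c : Char) (h : PySem.Chars.isalnum c = true) :
    PySem.Chars.isspace c = false := by
  have hlt := pvAlnumLt c h
  have := pvChar128b ⟨c.toNat, hlt⟩
  rw [Char.ofNat_toNat] at this
  exact (this h).1

theorem pv_alnum_ne_dash (c : Char) (h : PySem.Chars.isalnum c = true) : c ≠ '-' := by
  have hlt := pvAlnumLt c h
  have := pvChar128b ⟨c.toNat, hlt⟩
  rw [Char.ofNat_toNat] at this
  exact (this h).2

-- ---- small list facts used below ----

theorem pvDropWhile_head (p : Char → Bool) (l : List Char) (r : Char) (rs : List Char)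
    (h : l.dropWhile p = r :: rs) : p r = false := by
  induction l with
  | nil => simp at h
  | cons a as ih =>
    by_cases hp : p a
    · rw [List.dropWhile_cons_of_pos hp] at h; exact ih h
    · rw [List.dropWhile_cons_of_neg hp] at h
      obtain ⟨rfl, -⟩ := List.cons.injEq .. ▸ h
      · simpa using hp

theorem pvInter_singleton (sep a : List Char) : List.intercalate sep [a] = a := by
  simp [List.intercalate]

theorem pvInter_cons₂ (sep a b : List Char) (l : List (List Char)) :
    List.intercalate sep (a :: b :: l) = a ++ sep ++ List.intercalate sep (b :: l) := by
  simp [List.intercalate, List.intersperse]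

-- ---- A side: foldl = pvKf (after the member-wise predicate agreement) ----

theorem pvFold_eq_kf (ls : List Char)
    (H : ∀ c ∈ ls, pvAln c = PySem.Chars.isalnum c) (acc : List Char) (p : Bool) :
    (ls.foldl (fun st ch =>
        if ('a' ≤ ch ∧ ch ≤ 'z') ∨ ('0' ≤ ch ∧ ch ≤ '9') then (st.1 ++ [ch], false)
        else if st.2 = false then (st.1 ++ ['-'], true) else st) (acc, p)).1
      = acc ++ pvKf p ls := by
  induction ls generalizing acc p with
  | nil => simp [pvKf]
  | cons c cs ih =>
    have hc : pvAln c = PySem.Chars.isalnum c := H c (by simp)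
    have H' : ∀ x ∈ cs, pvAln x = PySem.Chars.isalnum x := fun x hx => H x (by simp [hx])
    by_cases hal : ('a' ≤ c ∧ c ≤ 'z') ∨ ('0' ≤ c ∧ c ≤ '9')
    · have hA : PySem.Chars.isalnum c = true := by rw [← hc]; simpa [pvAln]
      simp only [List.foldl_cons, if_pos hal]
      rw [ih H' (acc ++ [c]) false]
      simp [pvKf, hA]
    · have hA : PySem.Chars.isalnum c = false := by rw [← hc]; simpa [pvAln] using hal
      cases p with
      | false =>
        simp only [List.foldl_cons, if_neg hal]
        rw [if_pos trivial]
        rw [ih H' (acc ++ ['-']) true]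
        simp [pvKf, hA]
      | true =>
        simp only [List.foldl_cons, if_neg hal]
        rw [if_neg (by simp)]
        rw [ih H' acc true]
        simp [pvKf, hA]

-- pvKf true skips a non-alnum block then equals pvKf false
theorem pvKf_true_skip (x t : List Char) (hx : ∀ c ∈ x, PySem.Chars.isalnum c = false)
    (ht : t = [] ∨ ∃ d ds, t = d :: ds ∧ PySem.Chars.isalnum d = true) :
    pvKf true (x ++ t) = pvKf false t := by
  induction x with
  | nil =>
    rcases ht with rfl | ⟨d, ds, rfl, hd⟩
    · rfl
    · simp [pvKf, hd]
  | cons a as ih =>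
    have ha : PySem.Chars.isalnum a = false := hx a (by simp)
    simp only [List.cons_append, pvKf, ha]
    simpa using ih (fun c hc => hx c (by simp [hc]))

theorem pvKf_word (w rest : List Char) (hw : ∀ c ∈ w, PySem.Chars.isalnum c = true) :
    pvKf false (w ++ rest) = w ++ pvKf false rest := by
  induction w with
  | nil => rfl
  | cons a as ih =>
    have ha := hw a (by simp)
    simp only [List.cons_append, pvKf, ha, if_pos]
    simpa using ih (fun c hc => hw c (by simp [hc]))

-- ---- B side: split₀ of the mapped list = pvAux ----

theorem pvGo_acc (s cur : List Char) (accs : List (List Char)) :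
    PySem.Chars.split₀.go s cur accs = accs.reverse ++ PySem.Chars.split₀.go s cur [] := by
  induction s generalizing cur accs with
  | nil =>
    by_cases h : cur.isEmpty <;> simp [PySem.Chars.split₀.go, h]
  | cons c rest ih =>
    by_cases hs : PySem.Chars.isspace c
    · by_cases hc : cur.isEmpty
      · simp only [PySem.Chars.split₀.go, hs, hc, if_pos]
        exact ih [] accs
      · simp only [PySem.Chars.split₀.go, hs, hc, if_pos, Bool.false_eq_true,
          reduceIte]
        rw [ih [] (cur.reverse :: accs), ih [] [cur.reverse]]
        simp
    · simp only [PySem.Chars.split₀.go, hs, Bool.false_eq_true, reduceIte]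
      exact ih (c :: cur) accs

theorem pvGo_eq_aux (ls : List Char) (cur : List Char) :
    PySem.Chars.split₀.go
        (ls.map (fun ch => if PySem.Chars.isalnum ch then ch else ' ')) cur []
      = pvAux cur ls := by
  induction ls generalizing cur with
  | nil => by_cases h : cur.isEmpty <;> simp [PySem.Chars.split₀.go, pvAux, h]
  | cons c cs ih =>
    by_cases hc : PySem.Chars.isalnum c
    · have hsp := pv_alnum_not_space c hc
      simp only [List.map_cons, hc, reduceIte, PySem.Chars.split₀.go, hsp,
        Bool.false_eq_true, pvAux]
      exact ih (c :: cur)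
    · have hsp : PySem.Chars.isspace ' ' = true := by decide
      by_cases hcur : cur.isEmpty
      · simp only [List.map_cons, hc, reduceIte, PySem.Chars.split₀.go, hsp, hcur, pvAux,
          Bool.false_eq_true, List.nil_append]
        exact ih []
      · simp only [List.map_cons, hc, reduceIte, PySem.Chars.split₀.go, hsp, hcur, pvAux,
          Bool.false_eq_true]
        rw [pvGo_acc _ [] [cur.reverse], ih []]
        simp

theorem pvAux_skip (x t : List Char) (hx : ∀ c ∈ x, PySem.Chars.isalnum c = false) :
    pvAux [] (x ++ t) = pvAux [] t := by
  induction x with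
  | nil => rfl
  | cons a as ih =>
    have ha : PySem.Chars.isalnum a = false := hx a (by simp)
    simp only [List.cons_append, pvAux, ha, Bool.false_eq_true, reduceIte,
      List.isEmpty_nil, List.nil_append]
    exact ih (fun c hc => hx c (by simp [hc]))

theorem pvAux_word (w rest cur : List Char) (hw : ∀ c ∈ w, PySem.Chars.isalnum c = true) :
    pvAux cur (w ++ rest) = pvAux (w.reverse ++ cur) rest := by
  induction w generalizing cur with
  | nil => simp
  | cons a as ih =>
    have ha := hw a (by simp)
    simp only [List.cons_append, pvAux, ha, reduceIte]
    rw [ih (a :: cur) (fun c hc => hw c (by simp [hc]))]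
    simp

theorem pvAux_ne_nil (cur : List Char) (ls : List Char) (h : cur ≠ []) :
    pvAux cur ls ≠ [] := by
  induction ls generalizing cur with
  | nil => simp [pvAux, List.isEmpty_eq_false_iff.mpr h]
  | cons c cs ih =>
    by_cases hc : PySem.Chars.isalnum c
    · simpa [pvAux, hc] using ih (c :: cur) (by simp)
    · simp [pvAux, hc, List.isEmpty_eq_false_iff.mpr h]

-- ---- rstrip facts ----

theorem pvRstripDash_nodash (w : List Char) (hw : ∀ c ∈ w, c ≠ '-') :
    pvRstripDash w = w := by
  have hdw : w.reverse.dropWhile (· == '-') = w.reverse := by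
    cases h' : w.reverse with
    | nil => simp
    | cons a as =>
      have ha : a ∈ w := by rw [← List.mem_reverse, h']; simp
      rw [List.dropWhile_cons_of_neg (by simp [hw a ha])]
  simp [pvRstripDash, hdw]

theorem pvRstripDash_ne_nil (c : Char) (cs : List Char) (h : c ≠ '-') :
    pvRstripDash (c :: cs) ≠ [] := by
  intro hcon
  unfold pvRstripDash at hcon
  rw [List.reverse_eq_nil_iff, List.dropWhile_eq_nil_iff] at hcon
  exact h (by simpa using hcon c (by simp))

theorem pvRstripDash_append (x y : List Char) (h : pvRstripDash y ≠ []) :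
    pvRstripDash (x ++ y) = x ++ pvRstripDash y := by
  have hne : (y.reverse.dropWhile (· == '-')).isEmpty = false := by
    rw [List.isEmpty_eq_false_iff]
    intro hnil
    exact h (by simp [pvRstripDash, hnil])
  simp only [pvRstripDash, List.reverse_append, List.dropWhile_append, hne,
    Bool.false_eq_true, reduceIte]
  simp

theorem pvRstripDash_dash (w : List Char) : pvRstripDash (w ++ ['-']) = pvRstripDash w := by
  simp [pvRstripDash]

-- ---- the core run induction ----

-- for input starting with an alnum char (or empty):
-- rstrip('-') of A's raw keep-list = '-'.join of B's words
theorem pvCore (n : Nat) (ls : List Char) (hl : ls.length ≤ n)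
    (hshape : ls = [] ∨ ∃ c cs, ls = c :: cs ∧ PySem.Chars.isalnum c = true) :
    pvRstripDash (pvKf false ls) = List.intercalate ['-'] (pvAux [] ls) := by
  induction n generalizing ls with
  | zero =>
    have : ls = [] := List.length_eq_zero_iff.mp (Nat.le_zero.mp hl)
    subst this
    simp [pvKf, pvAux, pvRstripDash, List.intercalate]
  | succ n ih =>
    rcases hshape with rfl | ⟨c, cs, rfl, hc⟩
    · simp [pvKf, pvAux, pvRstripDash, List.intercalate]
    · -- decompose the leading alnum run
      have hls : c :: cs = (c :: cs.takeWhile PySem.Chars.isalnum) ++ cs.dropWhile PySem.Chars.isalnum := by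
        simp
      set w : List Char := c :: cs.takeWhile PySem.Chars.isalnum with hw
      set rest : List Char := cs.dropWhile PySem.Chars.isalnum with hrestdef
      have hwal : ∀ x ∈ w, PySem.Chars.isalnum x = true := by
        intro x hx
        rcases List.mem_cons.mp hx with rfl | hx'
        · exact hc
        · exact List.mem_takeWhile_imp hx'
      have hwnd : ∀ x ∈ w, x ≠ '-' := fun x hx => pv_alnum_ne_dash x (hwal x hx)
      rw [hls, pvKf_word w rest hwal, pvAux_word w rest [] hwal, List.append_nil]
      cases hr : rest with
      | nil =>
        have hwe : w.reverse.isEmpty = false := by simp [hw]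
        simp only [List.append_nil, pvKf, pvAux, hwe, Bool.false_eq_true, reduceIte,
          List.reverse_reverse]
        rw [pvRstripDash_nodash w hwnd, pvInter_singleton]
      | cons r rs =>
        have hral : PySem.Chars.isalnum r = false := pvDropWhile_head _ cs r rs (hrestdef ▸ hr)
        set rs' : List Char := rs.dropWhile (fun x => !PySem.Chars.isalnum x) with hrs'def
        have hjunk : ∀ x ∈ rs.takeWhile (fun x => !PySem.Chars.isalnum x),
            PySem.Chars.isalnum x = false := by
          intro x hx
          have h2 := List.mem_takeWhile_imp hx
          revert h2; cases PySem.Chars.isalnum x <;> simp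
        have hshape' : rs' = [] ∨ ∃ d ds, rs' = d :: ds ∧ PySem.Chars.isalnum d = true := by
          cases hdd : rs' with
          | nil => exact Or.inl rfl
          | cons d ds =>
            refine Or.inr ⟨d, ds, rfl, ?_⟩
            have h2 := pvDropWhile_head _ rs d ds (hrs'def ▸ hdd)
            revert h2; cases PySem.Chars.isalnum d <;> simp
        have hsplit : rs = rs.takeWhile (fun x => !PySem.Chars.isalnum x) ++ rs' := by
          simp [hrs'def]
        have hkf : pvKf true rs = pvKf false rs' := by
          conv_lhs => rw [hsplit]
          exact pvKf_true_skip _ _ hjunk hshape'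
        have haux : pvAux [] rs = pvAux [] rs' := by
          conv_lhs => rw [hsplit]
          exact pvAux_skip _ _ hjunk
        have hkfr : pvKf false (r :: rs) = '-' :: pvKf false rs' := by
          simp [pvKf, hral, hkf]
        have hwe : w.reverse.isEmpty = false := by simp [hw]
        have hauxw : pvAux w.reverse (r :: rs) = w :: pvAux [] rs' := by
          simp [pvAux, hral, hwe, haux]
        -- length bookkeeping for the induction hypothesis
        have hlen : rs'.length ≤ n := by
          have h1 : rs'.length ≤ rs.length := hrs'def ▸ List.length_dropWhile_le _ _
          have h2 : rest.length ≤ cs.length := hrestdef ▸ List.length_dropWhile_le _ _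
          have h3 : (c :: cs).length ≤ n + 1 := hl
          rw [hr] at h2
          simp at h2 h3
          omega
        rw [hkfr, hauxw]
        rcases hshape' with h0 | ⟨d, ds, hdds, hd⟩
        · rw [h0]
          show pvRstripDash (w ++ '-' :: pvKf false []) = _
          have : pvKf false ([] : List Char) = [] := rfl
          rw [this]
          show pvRstripDash (w ++ ['-']) = _
          rw [pvRstripDash_dash, pvRstripDash_nodash w hwnd]
          simp [pvAux, pvInter_singleton]
        · have hz : pvKf false rs' = d :: pvKf false ds := by simp [pvKf, hdds, hd]
          have hzne : pvRstripDash (pvKf false rs') ≠ [] := by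
            rw [hz]; exact pvRstripDash_ne_nil d _ (pv_alnum_ne_dash d hd)
          have hIH : pvRstripDash (pvKf false rs') = List.intercalate ['-'] (pvAux [] rs') :=
            ih rs' hlen (Or.inr ⟨d, ds, hdds, hd⟩)
          have hne2 : pvAux [] rs' ≠ [] := by
            rw [hdds]
            show pvAux [] (d :: ds) ≠ []
            simp only [pvAux, hd, reduceIte]
            exact pvAux_ne_nil [d] ds (by simp)
          have hL : pvRstripDash (w ++ '-' :: pvKf false rs')
              = w ++ '-' :: pvRstripDash (pvKf false rs') := by
            have := pvRstripDash_append (w ++ ['-']) (pvKf false rs') hzne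
            simpa using this
          rw [hL, hIH]
          cases hy : pvAux [] rs' with
          | nil => exact absurd hy hne2
          | cons y ys =>
            rw [pvInter_cons₂]
            simp

-- full core: A's label = B's label, for every char list
theorem pvLabel (ls : List Char) :
    PySem.Chars.stripChars (pvKf false ls) ['-']
      = List.intercalate ['-'] (pvAux [] ls) := by
  set junk : List Char := ls.takeWhile (fun c => !PySem.Chars.isalnum c) with hjdef
  set ls₁ : List Char := ls.dropWhile (fun c => !PySem.Chars.isalnum c) with hl₁def
  have hsplit : ls = junk ++ ls₁ := by simp [hjdef, hl₁def]
  have hjunk : ∀ x ∈ junk, PySem.Chars.isalnum x = false := by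
    intro x hx
    have h2 := List.mem_takeWhile_imp (hjdef ▸ hx)
    revert h2; cases PySem.Chars.isalnum x <;> simp
  have hshape₁ : ls₁ = [] ∨ ∃ d ds, ls₁ = d :: ds ∧ PySem.Chars.isalnum d = true := by
    cases hdd : ls₁ with
    | nil => exact Or.inl rfl
    | cons d ds =>
      refine Or.inr ⟨d, ds, rfl, ?_⟩
      have h2 := pvDropWhile_head _ ls d ds (hl₁def ▸ hdd)
      revert h2; cases PySem.Chars.isalnum d <;> simp
  have hkf : pvKf false ls = (if junk.isEmpty then [] else ['-']) ++ pvKf false ls₁ := by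
    cases hj : junk with
    | nil =>
      conv_lhs => rw [hsplit, hj]
      simp
    | cons j js =>
      have hjal : PySem.Chars.isalnum j = false := hjunk j (by rw [hj]; simp)
      conv_lhs => rw [hsplit, hj]
      simp only [List.cons_append, pvKf, hjal, Bool.false_eq_true, reduceIte,
        List.isEmpty_cons]
      rw [pvKf_true_skip js ls₁ (fun c hc => hjunk c (by rw [hj]; simp [hc])) hshape₁]
      simp
  have hdrop : List.dropWhile (· == '-') (pvKf false ls) = pvKf false ls₁ := by
    rw [hkf]
    have htail : List.dropWhile (· == '-') (pvKf false ls₁) = pvKf false ls₁ := by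
      rcases hshape₁ with h0 | ⟨d, ds, hdds, hd⟩
      · rw [h0]; rfl
      · rw [hdds]
        have : pvKf false (d :: ds) = d :: pvKf false ds := by simp [pvKf, hd]
        rw [this, List.dropWhile_cons_of_neg (by simp [pv_alnum_ne_dash d hd])]
    by_cases hj : junk.isEmpty
    · simp only [hj, reduceIte, List.nil_append]
      exact htail
    · simp only [hj, Bool.false_eq_true, reduceIte, List.singleton_append,
        List.dropWhile_cons_of_pos (by simp : (('-' : Char) == '-') = true)]
      exact htail
  have hq : (fun c => List.contains ['-'] c) = (fun c : Char => c == '-') := by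
    funext x
    by_cases h : x = '-' <;> simp [h]
  show (List.dropWhile (fun c => List.contains ['-'] c)
      ((List.dropWhile (fun c => List.contains ['-'] c) (pvKf false ls)).reverse)).reverse = _
  rw [hq, hdrop]
  show pvRstripDash (pvKf false ls₁) = _
  rw [pvCore ls₁.length ls₁ le_rfl hshape₁]
  congr 1
  conv_rhs => rw [hsplit]
  exact (pvAux_skip junk ls₁ hjunk).symm

-- ===== VERDICT (by name: the statement is the Claim_ definition above) =====
theorem short_label_py_spec : Claim_equal_short_label_py := by
  intro text default max_len hdom
  unfold Spec_short_label_py short_label_py short_label_py_alt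
  have Hmem : ∀ c ∈ PySem.Chars.lower text.toList, pvAln c = PySem.Chars.isalnum c := by
    intro c hcmem
    simp only [PySem.Chars.lower, List.mem_map] at hcmem
    obtain ⟨c0, hc0, rfl⟩ := hcmem
    apply pvAln_eq_isalnum
    unfold Dom_short_label_py at hdom
    simp only [pvDomStr, Bool.and_eq_true, List.all_eq_true] at hdom
    exact hdom.1.1 c0 hc0
  have hA := pvFold_eq_kf (PySem.Chars.lower text.toList) Hmem [] false
  have hB := pvGo_eq_aux (PySem.Chars.lower text.toList) []
  simp only [PySem.Chars.split₀, PySem.Chars.join]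
  rw [hA, hB, List.nil_append, pvLabel]
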